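-- pv_equiv track=rewrite | github.com/AdamZhouSE/pythonHomework | Code/CodeRecords/2523/60750/240108.py | sortMartix
-- ===== SOURCE A (Python) =====
-- from collections import defaultdict
--
-- def sortMartix(data):
--     row = len(data)
--     line = len(data[0])
--     temp = defaultdict(list)
--
--     for i in range(0,row):
--         for j in range(0,line):
--             temp[i - j].append(data[i][j])
--     for num in temp:
--         temp[num].sort()
--     for i in range(0,row):
--         for j in range(0,line):
--             data[i][j] = temp[i - j].pop(0)
--     return data
-- ===== SOURCE B (Python) =====
-- def sortMartix(data):
--     row = len(data)
--     line = len(data[0])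
--     starts = [(0, j) for j in range(line)] + [(i, 0) for i in range(1, row)]
--     for si, sj in starts:
--         n = min(row - si, line - sj)
--         vals = sorted(data[si + k][sj + k] for k in range(n))
--         for k in range(n):
--             data[si + k][sj + k] = vals[k]
--     return data
-- ===== Notes on version B (the rewrite author's own statement) =====
-- stated objective: simpler
-- what changed: B drops A's defaultdict grouping/sorting/popping phases and instead walks each anti-diagonal once from its start cell on the top row or left column, gathering, sorting and writing that diagonal back locally.
import Mathlib
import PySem

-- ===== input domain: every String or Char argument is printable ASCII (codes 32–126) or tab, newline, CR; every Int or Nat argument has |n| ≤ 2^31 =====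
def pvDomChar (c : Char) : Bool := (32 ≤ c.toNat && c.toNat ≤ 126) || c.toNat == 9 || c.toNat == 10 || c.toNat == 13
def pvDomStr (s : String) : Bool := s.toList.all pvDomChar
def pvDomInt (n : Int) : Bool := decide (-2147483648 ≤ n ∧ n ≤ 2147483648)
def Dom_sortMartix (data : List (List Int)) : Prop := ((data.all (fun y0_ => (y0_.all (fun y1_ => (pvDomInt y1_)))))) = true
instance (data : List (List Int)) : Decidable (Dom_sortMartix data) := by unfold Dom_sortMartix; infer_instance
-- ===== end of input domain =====

-- B replaces A's defaultdict group/sort/pop phases by a local gather-sort-scatter walk of each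
-- anti-diagonal from its start cell (simpler, no global grouping structure); both mutate the
-- matrix in place in Python the same way, the equivalence below is about the returned value.

-- ===== PORT A =====
-- shared helpers for the Python subscripts data[i][j] and data[i][j] = v; both programs only use
-- nonnegative in-range loop indices there (Pre_ keeps every such access in range)
def cellGet (m : List (List Int)) (i j : Int) : Int :=
  PySem.List.pyGetD (PySem.List.pyGetD m i []) j 0

def cellSet (m : List (List Int)) (i j : Int) (v : Int) : List (List Int) :=
  m.set i.toNat ((PySem.List.pyGetD m i []).set j.toNat v)

def sortMartix (data : List (List Int)) : List (List Int) :=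
  let row : Int := PySem.List.len data
  let line : Int := PySem.List.len (PySem.List.pyGetD data 0 [])
  -- temp[i-j].append(data[i][j]) over the row-major double loop (defaultdict(list))
  let temp : PySem.Dict Int (List Int) :=
    (PySem.List.pyRange 0 row 1).foldl (fun d i =>
      (PySem.List.pyRange 0 line 1).foldl (fun d j =>
        d.modify (i - j) [] (fun l => l ++ [cellGet data i j])) d) PySem.Dict.empty
  -- for num in temp: temp[num].sort()
  let temp2 : PySem.Dict Int (List Int) :=
    temp.keys.foldl (fun d num =>
      d.modify num [] (fun l => PySem.List.sorted l (fun x => x) false)) temp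
  -- data[i][j] = temp[i-j].pop(0); pop(0) = headD/tail here, exact because under Pre_ the
  -- popped list is never empty (each diagonal holds exactly as many values as cells)
  let st :=
    (PySem.List.pyRange 0 row 1).foldl (fun st i =>
      (PySem.List.pyRange 0 line 1).foldl (fun st j =>
        let l := st.2.getD (i - j) []
        (cellSet st.1 i j (l.headD 0), st.2.insert (i - j) l.tail)) st) (data, temp2)
  st.1

-- ===== PORT B =====
def sortMartix_alt (data : List (List Int)) : List (List Int) :=
  let row : Int := PySem.List.len data
  let line : Int := PySem.List.len (PySem.List.pyGetD data 0 [])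
  let starts : List (Int × Int) :=
    (PySem.List.pyRange 0 line 1).map (fun j => ((0 : Int), j)) ++
    (PySem.List.pyRange 1 row 1).map (fun i => (i, (0 : Int)))
  starts.foldl (fun m p =>
    let n := min (row - p.1) (line - p.2)
    let vals := PySem.List.sorted
      ((PySem.List.pyRange 0 n 1).map (fun k => cellGet m (p.1 + k) (p.2 + k)))
      (fun x => x) false
    (PySem.List.pyRange 0 n 1).foldl (fun m k =>
      cellSet m (p.1 + k) (p.2 + k) (PySem.List.pyGetD vals k 0)) m) data

-- ===== PRECONDITION & SPEC =====
-- Pre_ = exactly where the Python A returns: data[0] needs a first row, and every row must reach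
-- the first row's length or data[i][j] raises IndexError (B raises on the same inputs).
def Pre_sortMartix (data : List (List Int)) : Prop :=
  data ≠ [] ∧ ∀ r ∈ data, (data.headD []).length ≤ r.length
instance (data : List (List Int)) : Decidable (Pre_sortMartix data) := by
  unfold Pre_sortMartix; infer_instance

def pvWitness_sortMartix : List (List Int) := [[3, 1, 2], [9, 0, 4]]

def Spec_sortMartix (data : List (List Int)) (out : List (List Int)) : Prop := out = sortMartix_alt data
instance (data : List (List Int)) (out : List (List Int)) : Decidable (Spec_sortMartix data out) := by unfold Spec_sortMartix; infer_instance

-- ===== CLAIM (what is proved, stated in full; the proofs are below) =====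
def Claim_equal_sortMartix : Prop := ∀ (data : List (List Int)), Dom_sortMartix data → Pre_sortMartix data → Spec_sortMartix data (sortMartix data)

-- ===== LEMMAS AND PROOFS =====
-- ===== proof-side definitions =====
def pvRowCells (L a : Nat) : List (Nat × Nat) := (List.range L).map (fun b => (a, b))
def pvCells (R L : Nat) : List (Nat × Nat) := (List.range R).flatMap (pvRowCells L)
def pvBefore (L i j : Nat) : List (Nat × Nat) := pvCells i L ++ (List.range j).map (fun b => (i, b))
def pvVal (m : List (List Int)) (a b : Nat) : Int := (m.getD a []).getD b 0
def pvKey (p : Nat × Nat) : Int := (p.1 : Int) - (p.2 : Int)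
def pvDiag (data : List (List Int)) (L : Nat) (d : Int) : List Int :=
  ((pvCells data.length L).filter (fun p => pvKey p == d)).map (fun p => pvVal data p.1 p.2)
def pvSval (data : List (List Int)) (L : Nat) (a b : Nat) : Int :=
  (PySem.List.sorted (pvDiag data L ((a : Int) - (b : Int))) (fun x => x) false).getD (min a b) 0
def pvMat (data : List (List Int)) (L : Nat) (P : Nat → Nat → Bool) : List (List Int) :=
  data.mapIdx (fun a r => r.mapIdx (fun b v => if P a b then pvSval data L a b else v))
def pvCnt (L i j : Nat) (c : Int) : Nat := (pvBefore L i j).countP (fun p => pvKey p == c)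

-- nested loop flattening
theorem pv_foldl_nested {α β σ : Type} (xs : List α) (ys : List β) (g : σ → α × β → σ) (init : σ) :
    xs.foldl (fun s i => ys.foldl (fun s j => g s (i, j)) s) init
      = (xs.flatMap (fun i => ys.map (fun j => (i, j)))).foldl g init := by
  induction xs generalizing init with
  | nil => rfl
  | cons x xs ih => simp [List.foldl_append, List.foldl_map, ih]

-- sort loop over distinct keys
theorem pv_foldl_modify_sort {ν : Type} (f : List ν → List ν) :
    ∀ (ks : List Int) (d : PySem.Dict Int (List ν)) (c : Int), ks.Nodup →
    ((ks.foldl (fun d k => d.modify k [] f) d).getD c []) =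
      if c ∈ ks then f (d.getD c []) else d.getD c [] := by
  intro ks
  induction ks with
  | nil => simp
  | cons k rest ih =>
    intro d c hnd
    simp only [List.foldl_cons]
    rcases List.nodup_cons.mp hnd with ⟨hk, hrest⟩
    rw [ih _ c hrest]
    by_cases hc : c = k
    · subst hc
      simp [hk, PySem.Dict.getD_modify_self]
    · rw [PySem.Dict.getD_modify_of_ne]
      · simp [hc]
      · exact hc

theorem pv_head (data : List (List Int)) : PySem.List.pyGetD data 0 [] = data.headD [] := by
  have := PySem.List.pyGetD_natCast data 0 []
  simpa [List.headD_eq_head?_getD, List.head?_eq_getElem?] using this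

theorem pv_cellGet_natCast (data : List (List Int)) (a b : Nat) :
    cellGet data (a : Int) (b : Int) = pvVal data a b := by
  simp [cellGet, pvVal, PySem.List.pyGetD_natCast]

theorem pv_cells_cast (R L : Nat) :
    ((PySem.List.pyRange 0 (R : Int) 1).flatMap (fun i =>
      (PySem.List.pyRange 0 (L : Int) 1).map (fun j => (i, j))))
    = (pvCells R L).map (fun p => ((p.1 : Int), (p.2 : Int))) := by
  simp [PySem.List.pyRange_zero_nat, pvCells, pvRowCells, List.flatMap_map, List.map_flatMap,
    Function.comp_def]

theorem pv_phase1 (data : List (List Int)) (c : Int) :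
    (((PySem.List.pyRange 0 (PySem.List.len data) 1).foldl (fun d i =>
        (PySem.List.pyRange 0 (PySem.List.len (PySem.List.pyGetD data 0 [])) 1).foldl (fun d j =>
          d.modify (i - j) [] (fun l => l ++ [cellGet data i j])) d)
      (PySem.Dict.empty : PySem.Dict Int (List Int))).getD c [])
      = pvDiag data ((data.headD []).length) c := by
  rw [pv_foldl_nested _ _ (fun (d : PySem.Dict Int (List Int)) (p : Int × Int) => d.modify (p.1 - p.2) [] (fun l => l ++ [cellGet data p.1 p.2]))]
  rw [show PySem.List.len data = ((data.length : Nat) : Int) by simp,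
      show PySem.List.len (PySem.List.pyGetD data 0 []) = (((data.headD []).length : Nat) : Int) by
        rw [pv_head]; simp]
  rw [pv_cells_cast, List.foldl_map]
  have hstep : (fun (d : PySem.Dict Int (List Int)) (p : Nat × Nat) =>
      d.modify ((p.1 : Int) - (p.2 : Int)) [] (fun l => l ++ [cellGet data (p.1 : Int) (p.2 : Int)]))
      = fun d p => d.modify (pvKey p) [] (fun l => l ++ [pvVal data p.1 p.2]) := by
    funext d p
    rw [pv_cellGet_natCast]; rfl
  rw [hstep]
  have := PySem.Dict.getD_foldl_modify_append
    ((pvCells data.length ((data.headD []).length)).map (fun p => (pvKey p, pvVal data p.1 p.2)))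
    (PySem.Dict.empty : PySem.Dict Int (List Int)) c
  rw [List.foldl_map] at this
  simp only [this, PySem.Dict.getD_empty, List.nil_append, List.filter_map, List.map_map]
  rw [pvDiag]
  congr 1

theorem pv_phase2 (temp : PySem.Dict Int (List Int)) (hnd : temp.keys.Nodup) (c : Int) :
    (temp.keys.foldl (fun d num =>
        d.modify num [] (fun l => PySem.List.sorted l (fun x => x) false)) temp).getD c []
      = PySem.List.sorted (temp.getD c []) (fun x => x) false := by
  rw [pv_foldl_modify_sort _ temp.keys temp c hnd]
  by_cases hc : c ∈ temp.keys
  · simp [hc]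
  · have hcon : temp.contains c = false := by
      rcases Bool.eq_false_or_eq_true (temp.contains c) with h | h
      · exact absurd ((PySem.Dict.contains_iff_mem_keys temp c).mp h) hc
      · exact h
    rw [if_neg hc, PySem.Dict.getD_of_not_contains temp [] hcon]
    rfl

theorem pv_length_mat (data : List (List Int)) (L : Nat) (P : Nat → Nat → Bool) :
    (pvMat data L P).length = data.length := by
  simp [pvMat]

theorem pv_getD_mat (data : List (List Int)) (L : Nat) (P : Nat → Nat → Bool) (a : Nat)
    (ha : a < data.length) :
    (pvMat data L P).getD a [] = (data.getD a []).mapIdx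
      (fun b v => if P a b then pvSval data L a b else v) := by
  rw [List.getD_eq_getElem _ _ (by simpa [pv_length_mat] using ha)]
  rw [List.getD_eq_getElem _ _ ha]
  simp only [pvMat, List.getElem_mapIdx]

theorem pv_val_mat (data : List (List Int)) (L : Nat) (P : Nat → Nat → Bool) (a b : Nat)
    (ha : a < data.length) (hb : b < (data.getD a []).length) :
    pvVal (pvMat data L P) a b = if P a b then pvSval data L a b else pvVal data a b := by
  rw [pvVal, pv_getD_mat data L P a ha]
  rw [List.getD_eq_getElem _ _ (by simpa using hb), List.getElem_mapIdx]
  rw [pvVal, List.getD_eq_getElem _ _ hb]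

theorem pv_mat_congr (data : List (List Int)) (L : Nat) (P Q : Nat → Nat → Bool)
    (h : ∀ x y, x < data.length → y < (data.getD x []).length → P x y = Q x y) :
    pvMat data L P = pvMat data L Q := by
  apply List.ext_getElem (by simp [pv_length_mat])
  intro x hx1 hx2
  have hx : x < data.length := by simpa [pv_length_mat] using hx1
  simp only [pvMat, List.getElem_mapIdx]
  apply List.ext_getElem (by simp)
  intro y hy1 hy2
  have hy : y < (data.getD x []).length := by
    rw [List.getD_eq_getElem _ _ hx]
    simpa using hy1
  simp only [List.getElem_mapIdx]
  rw [h x y hx hy]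

theorem pv_mat_false (data : List (List Int)) (L : Nat) :
    pvMat data L (fun _ _ => false) = data := by
  apply List.ext_getElem (by simp [pv_length_mat])
  intro x hx1 hx2
  simp only [pvMat, List.getElem_mapIdx, Bool.false_eq_true, if_false]
  apply List.ext_getElem (by simp)
  intro y hy1 hy2
  simp only [List.getElem_mapIdx]

theorem pv_set_mat (data : List (List Int)) (L : Nat) (P Q : Nat → Nat → Bool) (a b : Nat)
    (v : Int) (ha : a < data.length) (hb : b < (data.getD a []).length)
    (hv : v = pvSval data L a b)
    (hQ : ∀ x y, x < data.length → y < (data.getD x []).length →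
      Q x y = (P x y || (decide (x = a) && decide (y = b)))) :
    cellSet (pvMat data L P) (a : Int) (b : Int) v = pvMat data L Q := by
  rw [cellSet, PySem.List.pyGetD_natCast, Int.toNat_natCast, Int.toNat_natCast]
  apply List.ext_getElem (by simp [pv_length_mat])
  intro x hx1 hx2
  have hx : x < data.length := by simpa [pv_length_mat] using hx2
  by_cases hxa : x = a
  · subst hxa
    rw [List.getElem_set_self (by simpa [pv_length_mat] using hx)]
    rw [pv_getD_mat data L P x hx]
    simp only [pvMat, List.getElem_mapIdx]
    have hgd : data.getD x [] = data[x]'hx := List.getD_eq_getElem _ _ hx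
    apply List.ext_getElem (by simp [List.getElem?_eq_getElem hx])
    intro y hy1 hy2
    have hy : y < (data.getD x []).length := by
      simpa using hy1
    by_cases hyb : y = b
    · subst hyb
      rw [List.getElem_set_self (by simpa using hy)]
      rw [List.getElem_mapIdx]
      rw [hQ x y hx hy]
      simp [hv]

    · rw [List.getElem_set_ne (fun h => hyb h.symm)]
      rw [List.getElem_mapIdx (h := by simpa using hy), List.getElem_mapIdx]
      rw [hQ x y hx hy]
      have he : (decide (x = x) && decide (y = b)) = false := by simp [hyb]
      rw [he, Bool.or_false]
      simp only [hgd]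
  · rw [List.getElem_set_ne (fun h => hxa h.symm)]
    simp only [pvMat, List.getElem_mapIdx]
    apply List.ext_getElem (by simp)
    intro y hy1 hy2
    have hy : y < (data.getD x []).length := by
      rw [List.getD_eq_getElem _ _ hx]; simpa using hy1
    simp only [List.getElem_mapIdx]
    rw [hQ x y hx hy]
    have he : (decide (x = a) && decide (y = b)) = false := by simp [hxa]
    rw [he, Bool.or_false]

theorem pv_countP_range_eq (n : Nat) (t : Int) :
    (List.range n).countP (fun b : Nat => ((b : Int) == t)) = if 0 ≤ t ∧ t < n then 1 else 0 := by
  induction n with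
  | zero => simp
  | succ n ih =>
    rw [List.range_succ, List.countP_append, ih]
    have hsing : (List.countP (fun b : Nat => ((b : Int) == t)) [n]) = if (n : Int) = t then 1 else 0 := by
      simp [List.countP_cons]
    rw [hsing]
    by_cases h1 : (n : Int) = t
    · rw [if_pos h1, if_neg (by omega), if_pos (by push_cast; omega)]
    · rw [if_neg h1]
      by_cases h2 : 0 ≤ t ∧ t < (n : Int)
      · rw [if_pos h2, if_pos (by push_cast; omega)]
      · rw [if_neg h2, if_neg (by push_cast; omega)]

theorem pv_count_rowcells (L a : Nat) (c : Int) :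
    (pvRowCells L a).countP (fun p => pvKey p == c)
      = if c ≤ (a : Int) ∧ (a : Int) < c + L then 1 else 0 := by
  rw [pvRowCells, List.countP_map]
  have hcg : ((fun p => pvKey p == c) ∘ (fun b => ((a, b) : Nat × Nat)))
      = fun b : Nat => ((b : Int) == (a : Int) - c) := by
    funext b
    simp only [Function.comp, pvKey]
    apply Bool.eq_iff_iff.mpr
    simp only [beq_iff_eq]
    omega
  rw [hcg, pv_countP_range_eq]
  have : (0 ≤ (a : Int) - c ∧ (a : Int) - c < L) ↔ (c ≤ (a : Int) ∧ (a : Int) < c + L) := by omega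
  simp only [this]

theorem pv_count_cells (L : Nat) (c : Int) :
    ∀ (i : Nat), (i : Int) ≤ c + L →
    (pvCells i L).countP (fun p => pvKey p == c) = i - c.toNat := by
  intro i
  induction i with
  | zero => simp [pvCells]
  | succ i ih =>
    intro h
    have hcells : pvCells (i + 1) L = pvCells i L ++ pvRowCells L i := by
      rw [pvCells, pvCells, List.range_succ, List.flatMap_append]
      simp
    rw [hcells, List.countP_append, ih (by omega), pv_count_rowcells]
    have hlt : ((i : Int) < c + L) := by omega
    by_cases hc : c ≤ (i : Int)
    · rw [if_pos ⟨hc, hlt⟩]; omega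
    · rw [if_neg (by tauto)]; omega

theorem pv_cnt_succ (L i j : Nat) (c : Int) :
    pvCnt L i (j + 1) c = pvCnt L i j c + (if ((i : Int) - (j : Int) == c) then 1 else 0) := by
  rw [pvCnt, pvCnt, pvBefore, pvBefore, List.range_succ, List.map_append]
  rw [← List.append_assoc, List.countP_append]
  simp [pvKey]

theorem pv_before_row (L i : Nat) : pvBefore L (i + 1) 0 = pvBefore L i L := by
  rw [pvBefore, pvBefore, pvCells, pvCells, List.range_succ, List.flatMap_append]
  simp [pvRowCells]

theorem pv_cnt_start (L i j : Nat) (hj : j < L) :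
    pvCnt L i j ((i : Int) - (j : Int)) = min i j := by
  rw [pvCnt, pvBefore, List.countP_append]
  rw [pv_count_cells L _ i (by omega)]
  rw [List.countP_map]
  have hcg : ((fun p => pvKey p == ((i : Int) - j)) ∘ (fun b => ((i, b) : Nat × Nat)))
      = fun b : Nat => ((b : Int) == (j : Int)) := by
    funext b
    simp only [Function.comp, pvKey]
    apply Bool.eq_iff_iff.mpr
    simp only [beq_iff_eq]
    omega
  rw [hcg, pv_countP_range_eq]
  rw [if_neg (by omega)]
  omega

theorem pv_drop_headD (l : List Int) (k : Nat) : (l.drop k).headD 0 = l.getD k 0 := by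
  simp [List.headD_eq_head?_getD, List.head?_drop, List.getD_eq_getElem?_getD]

theorem pv_filter_range_eq (n : Nat) (t : Int) :
    (List.range n).filter (fun b : Nat => ((b : Int) == t))
      = if 0 ≤ t ∧ t < n then [t.toNat] else [] := by
  induction n with
  | zero => simp
  | succ n ih =>
    rw [List.range_succ, List.filter_append, ih]
    have hsing : (List.filter (fun b : Nat => ((b : Int) == t)) [n])
        = if (n : Int) = t then [n] else [] := by
      by_cases h : (n : Int) = t
      · simp [List.filter, h]
      · have hb : ((n : Int) == t) = false := beq_eq_false_iff_ne.mpr h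
        simp [List.filter, hb, h]
    rw [hsing]
    by_cases h1 : (n : Int) = t
    · rw [if_pos h1, if_neg (by omega), if_pos (by push_cast; omega), List.nil_append]
      congr 1
      omega
    · rw [if_neg h1, List.append_nil]
      by_cases h2 : 0 ≤ t ∧ t < (n : Int)
      · rw [if_pos h2, if_pos (by push_cast; omega)]
      · rw [if_neg h2, if_neg (by push_cast; omega)]

theorem pv_filter_rowcells (L a : Nat) (d : Int) :
    (pvRowCells L a).filter (fun p => pvKey p == d)
      = if d ≤ (a : Int) ∧ (a : Int) < d + L then [(a, ((a : Int) - d).toNat)] else [] := by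
  rw [pvRowCells, List.filter_map]
  have hcg : ((fun p => pvKey p == d) ∘ (fun b => ((a, b) : Nat × Nat)))
      = fun b : Nat => ((b : Int) == (a : Int) - d) := by
    funext b
    simp only [Function.comp, pvKey]
    apply Bool.eq_iff_iff.mpr
    simp only [beq_iff_eq]
    omega
  rw [hcg, pv_filter_range_eq]
  by_cases h : d ≤ (a : Int) ∧ (a : Int) < d + L
  · rw [if_pos (by omega), if_pos h]
    simp
  · rw [if_neg (by omega), if_neg h]
    simp

theorem pv_filter_cells (L si sj : Nat) (hs : si = 0 ∨ sj = 0) (hsj : sj ≤ L) :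
    ∀ R : Nat, (pvCells R L).filter (fun p => pvKey p == ((si : Int) - (sj : Int)))
      = (List.range (min (R - si) (L - sj))).map (fun k => (si + k, sj + k)) := by
  intro R
  induction R with
  | zero => simp [pvCells]
  | succ R ih =>
    have hcells : pvCells (R + 1) L = pvCells R L ++ pvRowCells L R := by
      rw [pvCells, pvCells, List.range_succ, List.flatMap_append]
      simp
    rw [hcells, List.filter_append, ih, pv_filter_rowcells]
    by_cases h : (si : Int) - sj ≤ (R : Int) ∧ (R : Int) < (si : Int) - sj + L
    · rw [if_pos h]
      have hmin : min (R + 1 - si) (L - sj) = min (R - si) (L - sj) + 1 := by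
        rcases hs with h0 | h0 <;> (subst h0; simp at h ⊢; omega)
      rw [hmin, List.range_succ, List.map_append]
      congr 1
      have h1 : si + min (R - si) (L - sj) = R := by
        rcases hs with h0 | h0 <;> (subst h0; simp at h ⊢; omega)
      have h2 : sj + min (R - si) (L - sj) = (((R : Int) - ((si : Int) - sj)).toNat) := by
        rcases hs with h0 | h0 <;> (subst h0; simp at h ⊢; omega)
      simp [h1, h2]
    · rw [if_neg h, List.append_nil]
      have hmin : min (R + 1 - si) (L - sj) = min (R - si) (L - sj) := by
        rcases hs with h0 | h0 <;> (subst h0; simp at h ⊢; omega)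
      rw [hmin]

theorem pv_diag_enum (data : List (List Int)) (L si sj : Nat) (hs : si = 0 ∨ sj = 0)
    (hsj : sj ≤ L) :
    pvDiag data L ((si : Int) - (sj : Int))
      = (List.range (min (data.length - si) (L - sj))).map
          (fun k => pvVal data (si + k) (sj + k)) := by
  rw [pvDiag, pv_filter_cells L si sj hs hsj data.length, List.map_map]
  rfl

theorem pv_mem_diag (R L si sj a b : Nat) (hs : si = 0 ∨ sj = 0) (ha : a < R) (hb : b < L) :
    ((a : Int) - b = (si : Int) - sj) ↔
      ∃ k : Nat, k < min (R - si) (L - sj) ∧ a = si + k ∧ b = sj + k := by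
  constructor
  · intro h
    refine ⟨b - sj, ?_, ?_, ?_⟩ <;> (rcases hs with h0 | h0 <;> (subst h0; omega))
  · rintro ⟨k, hk, rfl, rfl⟩
    omega

def pvS (data : List (List Int)) (L : Nat) (c : Int) : List Int :=
  PySem.List.sorted (pvDiag data L c) (fun x => x) false

def pvPc (L i j : Nat) : Nat → Nat → Bool :=
  fun a b => decide (b < L) && (decide (a < i) || (decide (a = i) && decide (b < j)))

def pvStepA (st : List (List Int) × PySem.Dict Int (List Int)) (i j : Int) :
    List (List Int) × PySem.Dict Int (List Int) :=
  let l := st.2.getD (i - j) []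
  (cellSet st.1 i j (l.headD 0), st.2.insert (i - j) l.tail)

def pvInvA (data : List (List Int)) (L i j : Nat)
    (st : List (List Int) × PySem.Dict Int (List Int)) : Prop :=
  st.1 = pvMat data L (pvPc L i j) ∧
    ∀ c : Int, st.2.getD c [] = (pvS data L c).drop (pvCnt L i j c)

theorem pv_stepA_inv (data : List (List Int)) (L : Nat)
    (hrow : ∀ a, a < data.length → L ≤ (data.getD a []).length)
    (i j : Nat) (hi : i < data.length) (hj : j < L)
    (st : List (List Int) × PySem.Dict Int (List Int)) (h : pvInvA data L i j st) :
    pvInvA data L i (j + 1) (pvStepA st (i : Int) (j : Int)) := by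
  obtain ⟨h1, h2⟩ := h
  have hb : j < (data.getD i []).length := lt_of_lt_of_le hj (hrow i hi)
  have hl : st.2.getD ((i : Int) - (j : Int)) []
      = (pvS data L ((i : Int) - (j : Int))).drop (min i j) := by
    rw [h2, pv_cnt_start L i j hj]
  constructor
  · show cellSet st.1 (i : Int) (j : Int) ((st.2.getD ((i : Int) - (j : Int)) []).headD 0)
      = pvMat data L (pvPc L i (j + 1))
    rw [hl, pv_drop_headD, h1]
    apply pv_set_mat data L (pvPc L i j) (pvPc L i (j + 1)) i j _ hi hb
    · rfl
    · intro x y hx hy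
      apply Bool.eq_iff_iff.mpr
      simp only [pvPc, Bool.and_eq_true, Bool.or_eq_true, decide_eq_true_eq]
      omega
  · intro c
    show (st.2.insert ((i : Int) - (j : Int)) ((st.2.getD ((i : Int) - (j : Int)) []).tail)).getD c []
      = (pvS data L c).drop (pvCnt L i (j + 1) c)
    rw [PySem.Dict.getD_insert, pv_cnt_succ]
    by_cases hc : c = (i : Int) - (j : Int)
    · subst hc
      rw [if_pos rfl, hl, List.tail_drop, pv_cnt_start L i j hj]
      simp
    · rw [if_neg hc, h2 c]
      have : (((i : Int) - (j : Int)) == c) = false := by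
        apply beq_eq_false_iff_ne.mpr
        exact fun h => hc h.symm
      rw [this]
      simp

theorem pv_innerA_inv (data : List (List Int)) (L : Nat)
    (hrow : ∀ a, a < data.length → L ≤ (data.getD a []).length)
    (i : Nat) (hi : i < data.length)
    (st : List (List Int) × PySem.Dict Int (List Int)) (h : pvInvA data L i 0 st) :
    ∀ j, j ≤ L →
      pvInvA data L i j ((List.range j).foldl (fun st (b : Nat) => pvStepA st (i : Int) (b : Int)) st) := by
  intro j
  induction j with
  | zero => intro _; simpa using h
  | succ j ih =>
    intro hjL
    rw [List.range_succ, List.foldl_append, List.foldl_cons, List.foldl_nil]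
    exact pv_stepA_inv data L hrow i j hi (by omega) _ (ih (by omega))

theorem pv_rowstep_inv (data : List (List Int)) (L i : Nat)
    (st : List (List Int) × PySem.Dict Int (List Int)) (h : pvInvA data L i L st) :
    pvInvA data L (i + 1) 0 st := by
  obtain ⟨h1, h2⟩ := h
  constructor
  · rw [h1]
    apply pv_mat_congr
    intro x y _ _
    apply Bool.eq_iff_iff.mpr
    simp only [pvPc, Bool.and_eq_true, Bool.or_eq_true, decide_eq_true_eq]
    omega
  · intro c
    rw [h2 c, pvCnt, pvCnt, pv_before_row]

theorem pv_outerA_inv (data : List (List Int)) (L : Nat)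
    (hrow : ∀ a, a < data.length → L ≤ (data.getD a []).length)
    (st : List (List Int) × PySem.Dict Int (List Int)) (h : pvInvA data L 0 0 st) :
    ∀ i, i ≤ data.length →
      pvInvA data L i 0 ((List.range i).foldl (fun st (a : Nat) =>
        (List.range L).foldl (fun st (b : Nat) => pvStepA st (a : Int) (b : Int)) st) st) := by
  intro i
  induction i with
  | zero => intro _; simpa using h
  | succ i ih =>
    intro hiR
    rw [List.range_succ, List.foldl_append, List.foldl_cons, List.foldl_nil]
    apply pv_rowstep_inv
    exact pv_innerA_inv data L hrow i (by omega) _ (ih (by omega)) L le_rfl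

def pvPd (L : Nat) (D : Int → Bool) : Nat → Nat → Bool :=
  fun a b => decide (b < L) && D ((a : Int) - (b : Int))

def pvStepB (row line : Int) (m : List (List Int)) (p : Int × Int) : List (List Int) :=
  let n := min (row - p.1) (line - p.2)
  let vals := PySem.List.sorted
    ((PySem.List.pyRange 0 n 1).map (fun k => cellGet m (p.1 + k) (p.2 + k)))
    (fun x => x) false
  (PySem.List.pyRange 0 n 1).foldl (fun m k =>
    cellSet m (p.1 + k) (p.2 + k) (PySem.List.pyGetD vals k 0)) m

theorem pv_stepB_mat (data : List (List Int)) (L : Nat)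
    (hrow : ∀ a, a < data.length → L ≤ (data.getD a []).length)
    (si sj : Nat) (hs : si = 0 ∨ sj = 0) (hsi : si < data.length) (hsj : sj ≤ L)
    (D : Int → Bool) (hD : D ((si : Int) - (sj : Int)) = false) :
    pvStepB (data.length : Int) (L : Int) (pvMat data L (pvPd L D)) ((si : Int), (sj : Int))
      = pvMat data L (pvPd L (fun c => D c || (c == (si : Int) - (sj : Int)))) := by
  have hnn : min ((data.length : Int) - (si : Int)) ((L : Int) - (sj : Int))
      = ((min (data.length - si) (L - sj) : Nat) : Int) := by omega
  set R := data.length with hR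
  set nN := min (R - si) (L - sj) with hnN
  set d := (si : Int) - (sj : Int) with hd
  have hcell : ∀ k, k < nN → si + k < R ∧ sj + k < L := by intro k hk; omega
  have hmem : ∀ a b : Nat, a < R → b < L →
      (((a : Int) - b = d) ↔ ∃ k : Nat, k < nN ∧ a = si + k ∧ b = sj + k) :=
    fun a b ha hb => pv_mem_diag R L si sj a b hs ha hb
  -- the gathered values are the original diagonal
  have hgather : (PySem.List.pyRange 0 ((nN : Nat) : Int) 1).map
        (fun k => cellGet (pvMat data L (pvPd L D)) ((si : Int) + k) ((sj : Int) + k))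
      = pvDiag data L d := by
    rw [PySem.List.pyRange_zero_nat, List.map_map]
    rw [pv_diag_enum data L si sj hs hsj]
    apply List.map_congr_left
    intro k hk
    rw [List.mem_range] at hk
    simp only [Function.comp]
    have hc1 : ((si : Int) + (k : Int)) = (((si + k : Nat) : Nat) : Int) := by push_cast; ring
    have hc2 : ((sj : Int) + (k : Int)) = (((sj + k : Nat) : Nat) : Int) := by push_cast; ring
    rw [hc1, hc2, pv_cellGet_natCast]
    rw [pv_val_mat data L _ _ _ (hcell k hk).1 (lt_of_lt_of_le (hcell k hk).2 (hrow _ (hcell k hk).1))]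
    have hfalse : pvPd L D (si + k) (sj + k) = false := by
      show (decide (sj + k < L) && D (((si + k : Nat) : Int) - ((sj + k : Nat) : Int))) = false
      rw [show ((si + k : Nat) : Int) - ((sj + k : Nat) : Int) = d from by push_cast; omega, hD,
        Bool.and_false]
    rw [hfalse]
    simp
  -- the scatter loop, one cell at a time
  have hscatter : ∀ t, t ≤ nN →
      (List.range t).foldl (fun m (k : Nat) =>
          cellSet m ((si : Int) + (k : Int)) ((sj : Int) + (k : Int))
            (PySem.List.pyGetD (pvS data L d) (k : Int) 0)) (pvMat data L (pvPd L D))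
        = pvMat data L (fun a b => decide (b < L) &&
            (D ((a : Int) - b) || (((a : Int) - b == d) && decide (a < si + t)))) := by
    intro t
    induction t with
    | zero =>
      intro _
      rw [List.range_zero, List.foldl_nil]
      apply pv_mat_congr
      intro x y hx hy
      apply Bool.eq_iff_iff.mpr
      simp only [pvPd, Bool.and_eq_true, Bool.or_eq_true, decide_eq_true_eq, beq_iff_eq]
      constructor
      · rintro ⟨h1, h2⟩; exact ⟨h1, Or.inl h2⟩
      · rintro ⟨h1, h2 | ⟨h2, h3⟩⟩
        · exact ⟨h1, h2⟩
        · obtain ⟨k, hk, rfl, rfl⟩ := (hmem x y hx h1).mp h2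
          omega
    | succ t ih =>
      intro ht
      rw [List.range_succ, List.foldl_append, List.foldl_cons, List.foldl_nil, ih (by omega)]
      have hc1 : ((si : Int) + (t : Int)) = (((si + t : Nat) : Nat) : Int) := by push_cast; ring
      have hc2 : ((sj : Int) + (t : Int)) = (((sj + t : Nat) : Nat) : Int) := by push_cast; ring
      have hit : si + t < R ∧ sj + t < L := hcell t (by omega)
      rw [hc1, hc2]
      apply pv_set_mat data L _ _ (si + t) (sj + t) _ hit.1
        (lt_of_lt_of_le hit.2 (hrow _ hit.1))
      · rw [PySem.List.pyGetD_natCast]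
        rw [pvSval]
        have hdd : ((si + t : Nat) : Int) - ((sj + t : Nat) : Int) = d := by push_cast; omega
        have hmin : min (si + t) (sj + t) = t := by omega
        rw [hdd, hmin]
        rfl
      · intro x y hx hy
        apply Bool.eq_iff_iff.mpr
        simp only [Bool.and_eq_true, Bool.or_eq_true, decide_eq_true_eq, beq_iff_eq]
        constructor
        · rintro ⟨h1, h2 | ⟨h2, h3⟩⟩
          · exact Or.inl ⟨h1, Or.inl h2⟩
          · by_cases hxe : x = si + t
            · right
              constructor
              · exact hxe
              · omega
            · left
              exact ⟨h1, Or.inr ⟨h2, by omega⟩⟩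
        · rintro (⟨h1, h2 | ⟨h2, h3⟩⟩ | ⟨rfl, rfl⟩)
          · exact ⟨h1, Or.inl h2⟩
          · exact ⟨h1, Or.inr ⟨h2, by omega⟩⟩
          · refine ⟨hit.2, Or.inr ⟨by push_cast; omega, by omega⟩⟩
  -- assemble the step
  rw [pvStepB]
  simp only [hnn]
  rw [hgather]
  rw [show PySem.List.sorted (pvDiag data L d) (fun x => x) false = pvS data L d from rfl]
  rw [PySem.List.pyRange_zero_nat, List.foldl_map]
  rw [hscatter nN le_rfl]
  apply pv_mat_congr
  intro x y hx hy
  apply Bool.eq_iff_iff.mpr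
  simp only [pvPd, Bool.and_eq_true, Bool.or_eq_true, decide_eq_true_eq, beq_iff_eq]
  constructor
  · rintro ⟨h1, h2 | ⟨h2, _⟩⟩
    · exact ⟨h1, Or.inl h2⟩
    · exact ⟨h1, Or.inr h2⟩
  · rintro ⟨h1, h2 | h2⟩
    · exact ⟨h1, Or.inl h2⟩
    · refine ⟨h1, Or.inr ⟨h2, ?_⟩⟩
      obtain ⟨k, hk, rfl, rfl⟩ := (hmem x y hx h1).mp h2
      omega

theorem pv_loopB (data : List (List Int)) (L : Nat)
    (hrow : ∀ a, a < data.length → L ≤ (data.getD a []).length) :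
    ∀ (ss : List (Nat × Nat)) (D : Int → Bool),
      (∀ p ∈ ss, p.1 < data.length ∧ p.2 ≤ L ∧ (p.1 = 0 ∨ p.2 = 0)) →
      (ss.map (fun p : Nat × Nat => (p.1 : Int) - (p.2 : Int))).Nodup →
      (∀ p ∈ ss, D ((p.1 : Int) - (p.2 : Int)) = false) →
      ss.foldl (fun m (p : Nat × Nat) =>
          pvStepB (data.length : Int) (L : Int) m ((p.1 : Int), (p.2 : Int)))
        (pvMat data L (pvPd L D))
        = pvMat data L (pvPd L (fun c =>
            D c || (ss.map (fun p : Nat × Nat => (p.1 : Int) - (p.2 : Int))).contains c)) := by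
  intro ss
  induction ss with
  | nil =>
    intro D _ _ _
    rw [List.foldl_nil]
    apply pv_mat_congr
    intro x y _ _
    simp [pvPd]
  | cons p ss ih =>
    intro D hval hnd hfresh
    rw [List.foldl_cons]
    rw [pv_stepB_mat data L hrow p.1 p.2 (hval p (by simp)).2.2 (hval p (by simp)).1
      (hval p (by simp)).2.1 D (hfresh p (by simp))]
    rw [ih (fun c => D c || (c == (p.1 : Int) - (p.2 : Int)))
      (fun q hq => hval q (by simp [hq]))
      (by simpa using hnd.of_cons)
      ?_]
    · apply pv_mat_congr
      intro x y _ _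
      apply Bool.eq_iff_iff.mpr
      simp only [pvPd, Bool.and_eq_true, Bool.or_eq_true, decide_eq_true_eq, beq_iff_eq,
        List.map_cons, List.contains_cons]
      tauto
    · intro q hq
      show (D ((q.1 : Int) - q.2) || ((q.1 : Int) - q.2 == (p.1 : Int) - p.2)) = false
      rw [hfresh q (by simp [hq]), Bool.false_or]
      apply beq_eq_false_iff_ne.mpr
      intro hcontra
      rw [List.map_cons, List.nodup_cons] at hnd
      exact hnd.1 (hcontra ▸ List.mem_map_of_mem hq)

theorem pv_portA (data : List (List Int))
    (hrows : ∀ r ∈ data, (data.headD []).length ≤ r.length) :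
    sortMartix data
      = pvMat data ((data.headD []).length)
          (fun _ b => decide (b < (data.headD []).length)) := by
  have hrow : ∀ a, a < data.length → (data.headD []).length ≤ (data.getD a []).length := by
    intro a ha
    rw [List.getD_eq_getElem _ _ ha]
    exact hrows _ (List.getElem_mem ha)
  -- the write loop applied to any dict with the sorted-diagonal lookup behaviour
  have key : ∀ t2 : PySem.Dict Int (List Int),
      (∀ c, t2.getD c [] = pvS data ((data.headD []).length) c) →
      (((List.range data.length).foldl (fun st (a : Nat) =>
          (List.range ((data.headD []).length)).foldl
            (fun st (b : Nat) => pvStepA st (a : Int) (b : Int)) st) ((data, t2) :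
            List (List Int) × PySem.Dict Int (List Int))).1)
        = pvMat data ((data.headD []).length)
            (fun _ b => decide (b < (data.headD []).length)) := by
    intro t2 ht2
    have h00 : pvInvA data ((data.headD []).length) 0 0 (data, t2) := by
      constructor
      · show data = _
        have h1 : pvMat data ((data.headD []).length) (pvPc ((data.headD []).length) 0 0)
            = pvMat data ((data.headD []).length) (fun _ _ => false) := by
          apply pv_mat_congr
          intro x y _ _
          simp [pvPc]
        rw [h1, pv_mat_false]
      · intro c
        show t2.getD c [] = _
        rw [ht2 c]
        have h0 : pvCnt ((data.headD []).length) 0 0 c = 0 := by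
          simp [pvCnt, pvBefore, pvCells]
        rw [h0, List.drop_zero]
    have hfin := pv_outerA_inv data ((data.headD []).length) hrow (data, t2) h00
      data.length le_rfl
    rw [hfin.1]
    apply pv_mat_congr
    intro x y hx _
    apply Bool.eq_iff_iff.mpr
    simp only [pvPc, Bool.and_eq_true, Bool.or_eq_true, decide_eq_true_eq]
    omega
  -- massage the port into that shape
  have hR : PySem.List.len data = ((data.length : Nat) : Int) := by simp
  have hL : PySem.List.len (PySem.List.pyGetD data 0 [])
      = (((data.headD []).length : Nat) : Int) := by rw [pv_head]; simp
  rw [sortMartix]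
  rw [hR, hL, PySem.List.pyRange_zero_nat, PySem.List.pyRange_zero_nat]
  rw [List.foldl_map]
  simp only [List.foldl_map]
  -- identify the dict pipeline
  apply key
  intro c
  -- keys of the grouping dict are nodup, so the sorting pass sorts each stored diagonal
  have hnd : (((List.range data.length).foldl (fun d (a : Nat) =>
      (List.range ((data.headD []).length)).foldl (fun d (b : Nat) =>
        d.modify ((a : Int) - (b : Int)) [] (fun l => l ++ [cellGet data (a : Int) (b : Int)])) d)
      (PySem.Dict.empty : PySem.Dict Int (List Int))).keys).Nodup := by
    rw [pv_foldl_nested _ _ (fun (d : PySem.Dict Int (List Int)) (p : Nat × Nat) =>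
      d.modify ((p.1 : Int) - (p.2 : Int)) [] (fun l => l ++ [cellGet data (p.1 : Int) (p.2 : Int)]))]
    exact PySem.Dict.nodup_keys_foldl_modify_key _
      (fun p : Nat × Nat => (p.1 : Int) - (p.2 : Int)) []
      (fun _ p => fun l => l ++ [cellGet data (p.1 : Int) (p.2 : Int)]) _
      (by simp [PySem.Dict.keys_empty])
  rw [pv_phase2 _ hnd c]
  -- and the grouping pass collected exactly the diagonals
  have hp1 := pv_phase1 data c
  rw [hR, hL, PySem.List.pyRange_zero_nat, PySem.List.pyRange_zero_nat] at hp1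
  simp only [List.foldl_map] at hp1
  rw [hp1]
  rfl

theorem pv_portB (data : List (List Int)) (hne : data ≠ [])
    (hrows : ∀ r ∈ data, (data.headD []).length ≤ r.length) :
    sortMartix_alt data
      = pvMat data ((data.headD []).length)
          (fun _ b => decide (b < (data.headD []).length)) := by
  have hR0 : 0 < data.length := List.length_pos_iff.mpr hne
  have hrow : ∀ a, a < data.length → (data.headD []).length ≤ (data.getD a []).length := by
    intro a ha
    rw [List.getD_eq_getElem _ _ ha]
    exact hrows _ (List.getElem_mem ha)
  set L := (data.headD []).length with hLdef
  set R := data.length with hRdef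
  set startsN : List (Nat × Nat) :=
    (List.range L).map (fun j => ((0 : Nat), j)) ++
    (List.range (R - 1)).map (fun i => (i + 1, (0 : Nat))) with hstartsN
  have hkey : ∀ q : Nat × Nat, q ∈ startsN → q.1 < R ∧ q.2 ≤ L ∧ (q.1 = 0 ∨ q.2 = 0) := by
    intro q hq
    rw [hstartsN, List.mem_append, List.mem_map, List.mem_map] at hq
    rcases hq with ⟨j, hj, rfl⟩ | ⟨i, hi, rfl⟩
    · rw [List.mem_range] at hj
      exact ⟨hR0, by omega, Or.inl rfl⟩
    · rw [List.mem_range] at hi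
      exact ⟨by omega, by omega, Or.inr rfl⟩
  have hnd : (startsN.map (fun p : Nat × Nat => (p.1 : Int) - (p.2 : Int))).Nodup := by
    rw [hstartsN, List.map_append, List.map_map, List.map_map]
    apply List.Nodup.append
    · apply List.Nodup.map _ List.nodup_range
      intro a b h
      simp only [Function.comp] at h
      omega
    · apply List.Nodup.map _ List.nodup_range
      intro a b h
      simp only [Function.comp] at h
      omega
    · intro c hc1 hc2
      rw [List.mem_map] at hc1 hc2
      obtain ⟨j, hj, rfl⟩ := hc1
      obtain ⟨i, hi, hk⟩ := hc2
      simp only [Function.comp] at hk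
      omega
  have hinit : data = pvMat data L (pvPd L (fun _ => false)) := by
    have h1 : pvMat data L (pvPd L (fun _ => false)) = pvMat data L (fun _ _ => false) := by
      apply pv_mat_congr
      intro x y _ _
      simp [pvPd]
    rw [h1, pv_mat_false]
  have hloop := pv_loopB data L hrow startsN (fun _ => false) hkey hnd (fun _ _ => rfl)
  rw [← hinit] at hloop
  have hfinal : startsN.foldl (fun m (p : Nat × Nat) =>
      pvStepB ((data.length : Nat) : Int) ((L : Nat) : Int) m ((p.1 : Int), (p.2 : Int))) data
      = pvMat data L (fun _ b => decide (b < L)) := by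
    rw [hloop]
    apply pv_mat_congr
    intro x y hx hy
    apply Bool.eq_iff_iff.mpr
    simp only [pvPd, Bool.and_eq_true, decide_eq_true_eq, Bool.false_or]
    constructor
    · rintro ⟨h1, _⟩; exact h1
    · intro h1
      refine ⟨h1, ?_⟩
      rw [List.contains_iff_mem, List.mem_map]
      by_cases hxy : y ≤ x
      · by_cases hx0 : x = y
        · refine ⟨(0, 0), ?_, by simp [hx0]⟩
          rw [hstartsN, List.mem_append, List.mem_map]
          exact Or.inl ⟨0, by rw [List.mem_range]; omega, rfl⟩
        · refine ⟨(x - y, 0), ?_, ?_⟩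
          · rw [hstartsN, List.mem_append]
            refine Or.inr ?_
            rw [List.mem_map]
            exact ⟨x - y - 1, by rw [List.mem_range]; omega, by simp; omega⟩
          · simp
            omega
      · refine ⟨(0, y - x), ?_, ?_⟩
        · rw [hstartsN, List.mem_append]
          refine Or.inl ?_
          rw [List.mem_map]
          exact ⟨y - x, by rw [List.mem_range]; omega, rfl⟩
        · simp
          omega
  have hRr : PySem.List.len data = ((R : Nat) : Int) := by simp [hRdef]
  have hLr : PySem.List.len (PySem.List.pyGetD data 0 []) = ((L : Nat) : Int) := by
    rw [pv_head]; simp [hLdef]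
  have hstarts : (PySem.List.pyRange 0 ((L : Nat) : Int) 1).map (fun j => ((0 : Int), j)) ++
        (PySem.List.pyRange 1 ((R : Nat) : Int) 1).map (fun i => (i, (0 : Int)))
      = startsN.map (fun p => ((p.1 : Int), (p.2 : Int))) := by
    rw [PySem.List.pyRange_zero_nat, PySem.List.pyRange_one, hstartsN, List.map_append]
    congr 1
    · rw [List.map_map, List.map_map]
      apply List.map_congr_left
      intro j _
      simp
    · rw [List.map_map, List.map_map]
      have htn : (((R : Nat) : Int) - 1).toNat = R - 1 := by omega
      rw [htn]
      apply List.map_congr_left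
      intro i _
      simp only [Function.comp, Prod.mk.injEq]
      constructor
      · push_cast; omega
      · simp
  rw [sortMartix_alt, hRr, hLr, hstarts, List.foldl_map]
  exact hfinal


-- ===== VERDICT (by name: the statement is the Claim_ definition above) =====
theorem sortMartix_spec : Claim_equal_sortMartix := by
  intro data _ hpre
  show sortMartix data = sortMartix_alt data
  rw [pv_portA data hpre.2, pv_portB data hpre.1 hpre.2]
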